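-- pv_equiv track=rewrite | github.com/jiang-lab-retina/hdmea_processing | dataframe_phase/classification_v2/divide_conquer_method/models/encoders.py | _get_conv_output_size
-- ===== SOURCE A (Python) =====
-- def _get_conv_output_size(input_length: int, hidden_dims: list[int]) -> int:
--     """Calculate the output size after all conv layers."""
--     size = input_length
--     for i in range(len(hidden_dims)):
--         kernel_size = 7 if i == 0 else (5 if i == 1 else 3)
--         padding = kernel_size // 2
--         stride = 2
--         size = (size + 2 * padding - kernel_size) // stride + 1
--     return size * hidden_dims[-1]
-- ===== SOURCE B (Python) =====
-- def _get_conv_output_size(input_length: int, hidden_dims: list[int]) -> int: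
--     """With odd kernels and padding = kernel//2, each layer is size -> ceil(size/2),
--     so n layers give ceil(input_length / 2**n): closed form, no loop."""
--     n = len(hidden_dims)
--     size = -(-input_length // (2 ** n))
--     return size * hidden_dims[-1]
-- ===== Notes on version B (the rewrite author's own statement) =====
-- stated objective: faster
-- what changed: Replaced the per-layer loop of integer-division updates by the closed form ceil(input_length/2**n) via one integer ceiling division, since padding=kernel//2 with odd kernels makes every layer exactly ceil-halve the size.
import Mathlib
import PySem

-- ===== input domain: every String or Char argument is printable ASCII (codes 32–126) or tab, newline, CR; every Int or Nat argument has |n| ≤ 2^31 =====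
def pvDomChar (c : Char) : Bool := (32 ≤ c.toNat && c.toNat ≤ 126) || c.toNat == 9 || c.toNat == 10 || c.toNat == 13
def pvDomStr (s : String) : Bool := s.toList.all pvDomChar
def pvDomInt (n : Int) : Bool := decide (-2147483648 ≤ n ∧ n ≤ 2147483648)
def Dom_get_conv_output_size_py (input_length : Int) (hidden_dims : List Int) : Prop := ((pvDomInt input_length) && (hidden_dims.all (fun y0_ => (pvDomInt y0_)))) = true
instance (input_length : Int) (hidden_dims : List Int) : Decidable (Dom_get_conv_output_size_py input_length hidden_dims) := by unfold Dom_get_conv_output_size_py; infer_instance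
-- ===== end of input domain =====

-- B replaces A's per-layer division loop by the closed form ceil(input_length / 2^n) (simpler, no loop).

-- ===== PORT A =====
def get_conv_output_size_py (input_length : Int) (hidden_dims : List Int) : Int :=
  let size := (PySem.List.pyRange 0 (hidden_dims.length : Int) 1).foldl
    (fun size i =>
      let kernel_size : Int := if i == 0 then 7 else if i == 1 then 5 else 3
      let padding := PySem.Int.floordiv kernel_size 2
      let stride : Int := 2
      PySem.Int.floordiv (size + 2 * padding - kernel_size) stride + 1) input_length
  size * (PySem.List.pyGet? hidden_dims (-1)).getD 0

-- ===== PORT B =====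
def get_conv_output_size_py_alt (input_length : Int) (hidden_dims : List Int) : Int :=
  let n := hidden_dims.length
  let size := -(PySem.Int.floordiv (-input_length) (2 ^ n))
  size * (PySem.List.pyGet? hidden_dims (-1)).getD 0

-- ===== PRECONDITION & SPEC =====
-- Pre_ excludes only hidden_dims = [], where Python A (and Python B) raise IndexError on hidden_dims[-1].
def Pre_get_conv_output_size_py (input_length : Int) (hidden_dims : List Int) : Prop := hidden_dims ≠ []
instance (input_length : Int) (hidden_dims : List Int) : Decidable (Pre_get_conv_output_size_py input_length hidden_dims) := by unfold Pre_get_conv_output_size_py; infer_instance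
def pvWitness_get_conv_output_size_py : Int × List Int := (100, [16, 32, 64])

def Spec_get_conv_output_size_py (input_length : Int) (hidden_dims : List Int) (out : Int) : Prop := out = get_conv_output_size_py_alt input_length hidden_dims
instance (input_length : Int) (hidden_dims : List Int) (out : Int) : Decidable (Spec_get_conv_output_size_py input_length hidden_dims out) := by unfold Spec_get_conv_output_size_py; infer_instance

-- ===== CLAIM (what is proved, stated in full; the proofs are below) =====
def Claim_equal_get_conv_output_size_py : Prop := ∀ (input_length : Int) (hidden_dims : List Int), Dom_get_conv_output_size_py input_length hidden_dims → Pre_get_conv_output_size_py input_length hidden_dims → Spec_get_conv_output_size_py input_length hidden_dims (get_conv_output_size_py input_length hidden_dims)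

-- ===== LEMMAS AND PROOFS =====

-- Each layer's update is ceil-halving, independent of i (all kernels are odd with padding = kernel//2).
theorem pv_step_eq (i s : Int) :
    (let kernel_size : Int := if i == 0 then 7 else if i == 1 then 5 else 3
     let padding := PySem.Int.floordiv kernel_size 2
     let stride : Int := 2
     PySem.Int.floordiv (s + 2 * padding - kernel_size) stride + 1)
    = PySem.Int.floordiv (s - 1) 2 + 1 := by
  by_cases h0 : i = 0
  · simp [h0]; ring_nf
  · by_cases h1 : i = 1
    · simp [h1]; ring_nf
    · simp [h0, h1]; ring_nf

-- Ceil-halving composed with ceil division by m gives ceil division by 2*m.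
theorem pv_halve_ceil (a m : Int) (hm : 0 < m) :
    PySem.Int.floordiv (-(PySem.Int.floordiv a m) - 1) 2 + 1 = -(PySem.Int.floordiv a (2 * m)) := by
  have h2m : (0:Int) < 2 * m := by omega
  obtain ⟨hq1, hq2⟩ := (PySem.Int.floordiv_eq_iff_of_pos hm).mp (rfl : PySem.Int.floordiv a m = _)
  obtain ⟨hQ1, hQ2⟩ := (PySem.Int.floordiv_eq_iff_of_pos h2m).mp (rfl : PySem.Int.floordiv a (2 * m) = _)
  set q := PySem.Int.floordiv a m with hq
  set Q := PySem.Int.floordiv a (2 * m) with hQ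
  have hl : 2 * Q ≤ q := by nlinarith
  have hr : q ≤ 2 * Q + 1 := by nlinarith
  have : PySem.Int.floordiv (-q - 1) 2 = -Q - 1 := by
    rw [PySem.Int.floordiv_eq_iff_of_pos (by norm_num : (0:Int) < 2)]
    omega
  omega

-- n ceil-halvings of s equal -((-s) // 2^n).
theorem pv_loop_closed (n : Nat) (s : Int) :
    (PySem.List.pyRange 0 (n : Int) 1).foldl
      (fun size i =>
        let kernel_size : Int := if i == 0 then 7 else if i == 1 then 5 else 3
        let padding := PySem.Int.floordiv kernel_size 2
        let stride : Int := 2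
        PySem.Int.floordiv (size + 2 * padding - kernel_size) stride + 1) s
    = -(PySem.Int.floordiv (-s) (2 ^ n)) := by
  induction n with
  | zero =>
      simp [PySem.List.pyRange_one_eq_nil (by norm_num : (0:Int) ≤ 0)]
  | succ k ih =>
      have hrange : PySem.List.pyRange 0 ((k : Int) + 1) 1
          = PySem.List.pyRange 0 (k : Int) 1 ++ [(k : Int)] :=
        PySem.List.pyRange_one_succ_right (by positivity)
      push_cast
      rw [hrange, List.foldl_append, ih]
      simp only [List.foldl_cons, List.foldl_nil]
      rw [pv_step_eq]
      have hm : (0:Int) < 2 ^ k := by positivity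
      have := pv_halve_ceil (-s) (2 ^ k) hm
      have hpow : (2:Int) * 2 ^ k = 2 ^ (k + 1) := by ring
      rw [hpow] at this
      rw [show -(PySem.Int.floordiv (-s) (2 ^ k)) - 1
            = (-(PySem.Int.floordiv (-s) (2 ^ k)) - 1) from rfl]
      omega

-- ===== VERDICT (by name: the statement is the Claim_ definition above) =====
theorem get_conv_output_size_py_spec : Claim_equal_get_conv_output_size_py := by
  intro input_length hidden_dims _ _
  unfold Spec_get_conv_output_size_py get_conv_output_size_py get_conv_output_size_py_alt
  simp only []
  rw [pv_loop_closed hidden_dims.length input_length]
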